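-- pv_equiv track=rewrite | github.com/jun9395/python_study | Streami/str_que2.py | solution
-- ===== SOURCE A (Python) =====
-- def solution(S):
--     str_S = list(S)[::-1]
--     now = 0
--     count = 0
--     while now < len(str_S):
--         count += 1
--         if str_S[now] == '1':
--             str_S[now] = '0'
--         else:
--             now += 1
--     return count
-- ===== SOURCE B (Python) =====
-- def solution(S):
--     return sum(2 if c == '1' else 1 for c in S)
-- ===== Notes on version B (the rewrite author's own statement) =====
-- stated objective: simpler
-- what changed: Replaced the flip/advance simulation over a mutated reversed copy by a single counting pass: each character costs 1 step, a '1' costs 2 (flip then advance), so B just sums these weights.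
import Mathlib
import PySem

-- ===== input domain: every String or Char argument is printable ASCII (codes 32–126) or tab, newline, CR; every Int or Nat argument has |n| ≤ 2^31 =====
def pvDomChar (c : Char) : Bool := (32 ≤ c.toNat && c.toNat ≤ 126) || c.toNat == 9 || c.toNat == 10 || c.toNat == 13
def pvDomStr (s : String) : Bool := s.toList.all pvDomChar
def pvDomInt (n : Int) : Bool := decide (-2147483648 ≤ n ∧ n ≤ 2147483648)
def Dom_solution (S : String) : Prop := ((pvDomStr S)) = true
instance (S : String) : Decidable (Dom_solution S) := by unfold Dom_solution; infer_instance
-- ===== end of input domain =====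

-- B replaces A's flip/advance simulation over a mutated reversed copy by one counting pass (weight 2 per '1', 1 otherwise); objective: simpler.


-- ===== PORT A =====
-- literal port of A's while loop: state (str_S, now, count); each pass either flips the
-- '1' at `now` to '0' (set) or advances `now`.  Termination measure: number of '1's not
-- yet passed plus the remaining distance to the end.
def solutionLoop (s : List Char) (now : Nat) (count : Int) : Int :=
  if h : now < s.length then
    if s[now] = '1' then
      solutionLoop (s.set now '0') now (count + 1)
    else
      solutionLoop s (now + 1) (count + 1)
  else count
termination_by (s.drop now).count '1' + (s.length - now)
decreasing_by
  · have hd : (s.set now '0').drop now = '0' :: s.drop (now + 1) := by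
      rw [List.drop_eq_getElem_cons (by simpa using h)]
      simp [List.getElem_set_self (by simpa using h), List.drop_set_of_lt]
    have hd2 : s.drop now = '1' :: s.drop (now + 1) := by
      rw [List.drop_eq_getElem_cons h]; simp_all
    simp only [hd, hd2, List.count_cons, List.length_set]
    simp
  · have hd2 : s.drop now = s[now] :: s.drop (now + 1) := List.drop_eq_getElem_cons h
    have hle : (s.drop (now+1)).count '1' ≤ (s.drop now).count '1' := by
      rw [hd2, List.count_cons]; omega
    omega

-- list(S)[::-1] ported as the PySem slice with step -1 (always returns some for step ≠ 0)
def solution (S : String) : Int :=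
  solutionLoop ((PySem.List.slice? S.toList none none (-1)).getD []) 0 0

-- ===== PORT B =====
-- Source B: sum(2 if c == '1' else 1 for c in S)
def solution_alt (S : String) : Int :=
  S.toList.foldl (fun acc c => acc + (if c = '1' then 2 else 1)) 0

-- ===== PRECONDITION & SPEC =====
def Spec_solution (S : String) (out : Int) : Prop := out = solution_alt S
instance (S : String) (out : Int) : Decidable (Spec_solution S out) := by unfold Spec_solution; infer_instance

-- ===== CLAIM (what is proved, stated in full; the proofs are below) =====
def Claim_equal_solution : Prop := ∀ (S : String), Dom_solution S → Spec_solution S (solution S)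

-- ===== LEMMAS AND PROOFS =====
def pvWeight (c : Char) : Int := if c = '1' then 2 else 1

def pvF (l : List Char) : Int := (l.map pvWeight).sum

theorem pvF_cons (c : Char) (l : List Char) : pvF (c :: l) = pvWeight c + pvF l := by
  simp [pvF]

theorem solutionLoop_eq (s : List Char) (now : Nat) (count : Int) :
    solutionLoop s now count = count + pvF (s.drop now) := by
  fun_induction solutionLoop s now count with
  | case1 s now count h h1 ih =>
      have hd : (s.set now '0').drop now = '0' :: s.drop (now + 1) := by
        rw [List.drop_eq_getElem_cons (by simpa using h)]
        simp [List.getElem_set_self (by simpa using h), List.drop_set_of_lt]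
      have hd2 : s.drop now = '1' :: s.drop (now + 1) := by
        rw [List.drop_eq_getElem_cons h]; simp_all
      rw [ih, hd, hd2, pvF_cons, pvF_cons]
      simp [pvWeight]; ring
  | case2 s now count h h1 ih =>
      have hd2 : s.drop now = s[now] :: s.drop (now + 1) := List.drop_eq_getElem_cons h
      rw [ih, hd2, pvF_cons]
      simp [pvWeight, h1]; ring
  | case3 s now count h =>
      rw [List.drop_eq_nil_of_le (by omega)]
      simp [pvF]

theorem pvF_reverse (l : List Char) : pvF l.reverse = pvF l := by
  simp [pvF]

theorem foldl_eq_pvF (l : List Char) (acc : Int) :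
    l.foldl (fun acc c => acc + (if c = '1' then 2 else 1)) acc = acc + pvF l := by
  induction l generalizing acc with
  | nil => simp [pvF]
  | cons c t ih => rw [List.foldl_cons, ih, pvF_cons]; simp [pvWeight]; ring

-- ===== VERDICT (by name: the statement is the Claim_ definition above) =====
theorem solution_spec : Claim_equal_solution := by
  intro S _
  unfold Spec_solution solution solution_alt
  rw [PySem.List.slice?_none_none_neg_one, foldl_eq_pvF]
  simp [solutionLoop_eq, pvF_reverse]
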